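-- pv_equiv track=rewrite | github.com/oleksandr-medviediev/campus_2018_python | Kyrylo_Yeremenko/3/task6.py | resolve_brawl
-- ===== SOURCE A (Python) =====
-- weapons = {"rock": 0, "paper": 1, "scissors": 2}
--
-- def is_beatable(attacker_weapon, defender_weapon):
--     """
--     Determines whether attacker can beat defender with wielded weapon
--     :param attacker_weapon: Index of attacker weapon
--     :param defender_weapon: Index of defender weapon
--     :return: Bool, True for beatable, False for unbeatable
--     """
--
--     return_value = False
--
--     if attacker_weapon == weapons["rock"]:
--
--         if defender_weapon == weapons["scissors"]:
--             return_value = True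
--
--     elif attacker_weapon == weapons["paper"]:
--
--         if defender_weapon == weapons["rock"]:
--             return_value = True
--
--     elif attacker_weapon == weapons["scissors"]:
--
--         if defender_weapon == weapons["paper"]:
--             return_value = True
--
--     return return_value
--
-- def resolve_brawl(brawl):
--     """
--     Determines the result of rock-paper-scissors brawl
--     :param brawl: Dictionary of player index on chosen weapon index
--     :return: List of players still in the game
--     """
--
--     weapons_present = set(brawl.values())
--
--     if weapons_present is set(weapons.values()):
--         return []
--
--     for attacker_weapon in weapons_present:
--
--         for defender_weapon in weapons_present:
--
--             if is_beatable(attacker_weapon, defender_weapon):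
--                 brawl = {key:val for key, val in brawl.items() if val != defender_weapon}
--
--     return list(brawl.keys())
-- ===== SOURCE B (Python) =====
-- weapons = {"rock": 0, "paper": 1, "scissors": 2}
--
--
-- def resolve_brawl(brawl):
--     """Rock-paper-scissors brawl: a player survives iff the unique weapon that
--     defeats theirs is absent from the brawl (inverse-lookup, no pair scan)."""
--     present = set(brawl.values())
--     defeated_by = {0: 1, 1: 2, 2: 0}  # weapon index -> the weapon that beats it
--     return [k for k, v in brawl.items() if defeated_by.get(v) not in present]
-- ===== Notes on version B (the rewrite author's own statement) =====
-- stated objective: simpler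
-- what changed: B drops the quadratic scan over pairs of present weapons entirely: it inverts the beats relation into a fixed map weapon->its unique counter and keeps a player iff the counter of their weapon is absent — one dict lookup and membership test per player, no nested loops or dict rebuilds.
import Mathlib
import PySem

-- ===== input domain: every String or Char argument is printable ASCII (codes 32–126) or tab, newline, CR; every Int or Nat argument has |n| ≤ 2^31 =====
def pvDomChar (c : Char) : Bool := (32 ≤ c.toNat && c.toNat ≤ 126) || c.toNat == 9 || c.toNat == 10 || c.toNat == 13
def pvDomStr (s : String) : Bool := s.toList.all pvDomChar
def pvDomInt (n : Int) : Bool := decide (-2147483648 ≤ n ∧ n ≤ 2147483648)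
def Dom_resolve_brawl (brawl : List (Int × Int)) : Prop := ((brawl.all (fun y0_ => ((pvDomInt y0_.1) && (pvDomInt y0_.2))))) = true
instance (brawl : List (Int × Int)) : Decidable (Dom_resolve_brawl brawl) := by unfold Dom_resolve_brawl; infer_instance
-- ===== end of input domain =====

-- B replaces A's nested loops over present-weapon pairs (with repeated dict rebuilding) by a fixed
-- inverse map weapon -> the unique weapon that defeats it: one membership test per player (simpler).


-- ===== PORT A =====
-- weapons = {"rock": 0, "paper": 1, "scissors": 2}
def pv_weapons : PySem.Dict String Int := PySem.Dict.ofList [("rock", 0), ("paper", 1), ("scissors", 2)]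

-- is_beatable; weapons["..."] always succeeds (the keys are present), so getD is exact here.
def pv_is_beatable (attacker_weapon defender_weapon : Int) : Bool :=
  if attacker_weapon = PySem.Dict.getD pv_weapons "rock" 0 then
    (if defender_weapon = PySem.Dict.getD pv_weapons "scissors" 0 then true else false)
  else if attacker_weapon = PySem.Dict.getD pv_weapons "paper" 0 then
    (if defender_weapon = PySem.Dict.getD pv_weapons "rock" 0 then true else false)
  else if attacker_weapon = PySem.Dict.getD pv_weapons "scissors" 0 then
    (if defender_weapon = PySem.Dict.getD pv_weapons "paper" 0 then true else false)
  else false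

-- resolve_brawl. `weapons_present is set(weapons.values())` compares the IDENTITY of two
-- freshly built set objects, which is always False in Python, so the `return []` never runs.
-- The two for-loops iterate over the set `weapons_present`; the result does not depend on the
-- iteration order (each step filters out one weapon's wielders and the set is fixed), so the
-- first-occurrence order of PySem.Set.ofList is exact.
def resolve_brawl (brawl : List (Int × Int)) : List Int :=
  let weapons_present : PySem.Set Int := PySem.Set.ofList (brawl.map Prod.snd)
  let final : List (Int × Int) :=
    weapons_present.foldl (fun b attacker_weapon =>
      weapons_present.foldl (fun b defender_weapon =>
        if pv_is_beatable attacker_weapon defender_weapon then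
          b.filter (fun kv => kv.2 != defender_weapon)
        else b) b) brawl
  final.map Prod.fst

-- ===== PORT B =====
-- defeated_by = {0: 1, 1: 2, 2: 0}: weapon index -> the unique weapon that beats it.
def pv_defeated_by : PySem.Dict Int Int := PySem.Dict.ofList [(0, 1), (1, 2), (2, 0)]

-- `defeated_by.get(v) not in present`: get returns None for other weapon indices, and None is
-- never a member of a set of ints, so the none branch keeps the player (exact).
def resolve_brawl_alt (brawl : List (Int × Int)) : List Int :=
  let present : PySem.Set Int := PySem.Set.ofList (brawl.map Prod.snd)
  (brawl.filter (fun kv =>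
      match PySem.Dict.get? pv_defeated_by kv.2 with
      | some w => !(PySem.Set.contains present w)
      | none => true)).map Prod.fst

-- ===== PRECONDITION & SPEC =====
def Spec_resolve_brawl (brawl : List (Int × Int)) (out : List Int) : Prop := out = resolve_brawl_alt brawl
instance (brawl : List (Int × Int)) (out : List Int) : Decidable (Spec_resolve_brawl brawl out) := by unfold Spec_resolve_brawl; infer_instance

-- ===== CLAIM (what is proved, stated in full; the proofs are below) =====
def Claim_equal_resolve_brawl : Prop := ∀ (brawl : List (Int × Int)), Dom_resolve_brawl brawl → Spec_resolve_brawl brawl (resolve_brawl brawl)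

-- ===== LEMMAS AND PROOFS =====

-- A left fold of filters is one filter by "no step matches".
theorem pv_foldl_filter_not_any {α : Type} (q : α → Int × Int → Bool) :
    ∀ (l : List α) (b : List (Int × Int)),
      l.foldl (fun b x => b.filter (fun kv => !q x kv)) b
        = b.filter (fun kv => !(l.any (fun x => q x kv))) := by
  intro l
  induction l with
  | nil => intro b; simp
  | cons x t ih =>
    intro b
    simp only [List.foldl_cons, ih, List.filter_filter, List.any_cons]
    apply List.filter_congr
    intro kv _
    cases q x kv <;> simp

-- a beats d exactly when the inverse map sends d to a.
theorem pv_is_beatable_iff_get? (a d : Int) :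
    pv_is_beatable a d = true ↔ PySem.Dict.get? pv_defeated_by d = some a := by
  have hr : PySem.Dict.getD pv_weapons "rock" 0 = 0 := by decide
  have hp : PySem.Dict.getD pv_weapons "paper" 0 = 1 := by decide
  have hs : PySem.Dict.getD pv_weapons "scissors" 0 = 2 := by decide
  have hdb : pv_defeated_by = PySem.Dict.mk [(0, 1), (1, 2), (2, 0)] := by decide
  rw [hdb]
  simp only [pv_is_beatable, hr, hp, hs, PySem.Dict.get?_mk_cons, beq_iff_eq]
  clear hr hp hs hdb
  split_ifs <;> (try omega) <;> simp [PySem.Dict.get?] <;> omega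

theorem resolve_brawl_spec' (brawl : List (Int × Int)) :
    resolve_brawl brawl = resolve_brawl_alt brawl := by
  unfold resolve_brawl resolve_brawl_alt
  simp only []
  set present := PySem.Set.ofList (brawl.map Prod.snd) with hpres
  -- rewrite A's inner and outer folds as single filters
  have hinner : ∀ (a : Int) (b : List (Int × Int)),
      present.foldl (fun b d =>
          if pv_is_beatable a d then b.filter (fun kv => kv.2 != d) else b) b
        = b.filter (fun kv => !(present.any (fun d => pv_is_beatable a d && kv.2 == d))) := by
    intro a b
    have hstep : (fun (b : List (Int × Int)) (d : Int) =>
        if pv_is_beatable a d then b.filter (fun kv => kv.2 != d) else b)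
        = fun b d => b.filter (fun kv => !(pv_is_beatable a d && kv.2 == d)) := by
      funext b d
      cases h : pv_is_beatable a d <;> simp [bne]
    rw [hstep, pv_foldl_filter_not_any (fun d kv => pv_is_beatable a d && kv.2 == d)]
  have houter :
      present.foldl (fun b a =>
          present.foldl (fun b d =>
            if pv_is_beatable a d then b.filter (fun kv => kv.2 != d) else b) b) brawl
        = brawl.filter (fun kv =>
            !(present.any (fun a => present.any (fun d => pv_is_beatable a d && kv.2 == d)))) := by
    have hstep : (fun (b : List (Int × Int)) (a : Int) =>
        present.foldl (fun b d =>
          if pv_is_beatable a d then b.filter (fun kv => kv.2 != d) else b) b)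
        = fun b a => b.filter (fun kv =>
            !(present.any (fun d => pv_is_beatable a d && kv.2 == d))) := by
      funext b a; exact hinner a b
    rw [hstep, pv_foldl_filter_not_any
      (fun a kv => present.any (fun d => pv_is_beatable a d && kv.2 == d))]
  rw [houter]
  -- the two filter predicates agree on every element of brawl
  have hfil : brawl.filter (fun kv =>
        !(present.any (fun a => present.any (fun d => pv_is_beatable a d && kv.2 == d))))
      = brawl.filter (fun kv =>
          match PySem.Dict.get? pv_defeated_by kv.2 with
          | some w => !(PySem.Set.contains present w)
          | none => true) := by
    apply List.filter_congr
    intro kv hkv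
    have hv : kv.2 ∈ present := by
      rw [hpres]
      exact (PySem.Set.mem_ofList _ _).mpr (List.mem_map_of_mem hkv)
    have hkey :
        (present.any (fun a => present.any (fun d => pv_is_beatable a d && kv.2 == d)))
        = (match PySem.Dict.get? pv_defeated_by kv.2 with
           | some w => PySem.Set.contains present w
           | none => false) := by
      apply Bool.eq_iff_iff.mpr
      constructor
      · intro h
        simp only [List.any_eq_true, Bool.and_eq_true, beq_iff_eq] at h
        obtain ⟨a, ha, d, _, hb, hd⟩ := h
        have hg := (pv_is_beatable_iff_get? a d).mp hb
        rw [← hd] at hg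
        rw [hg]
        simpa [PySem.Set.contains, List.contains_iff_mem] using ha
      · intro h
        cases hget : PySem.Dict.get? pv_defeated_by kv.2 with
        | none => rw [hget] at h; simp at h
        | some w =>
          rw [hget] at h
          simp only [PySem.Set.contains, List.contains_iff_mem] at h
          simp only [List.any_eq_true, Bool.and_eq_true, beq_iff_eq]
          exact ⟨w, by simpa using h, kv.2, hv, (pv_is_beatable_iff_get? w kv.2).mpr hget, rfl⟩
    rw [hkey]
    cases hget : PySem.Dict.get? pv_defeated_by kv.2 <;> simp
  rw [hfil]

-- ===== VERDICT (by name: the statement is the Claim_ definition above) =====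
theorem resolve_brawl_spec : Claim_equal_resolve_brawl := by
  intro brawl _
  unfold Spec_resolve_brawl
  exact resolve_brawl_spec' brawl
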